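-- pv_equiv track=rewrite | github.com/Newt-Tea/eMarket-MSU-Intro-to-SE_Group1 | eMarket/app/utils.py | search
-- ===== SOURCE A (Python) =====
-- def lcs(s1,s2,m,n,memo):
--     if m == 0 or n == 0:
--         return 0
--     if memo[m][n] != -1:
--         return memo[m][n]
--     if s1[m-1] == s2[n-1]:
--         memo[m][n] = 1 + lcs(s1,s2,m-1,n-1,memo)
--         return memo[m][n]
--     else:
--         memo[m][n] =  max(lcs(s1,s2,m,n-1,memo),lcs(s1,s2,m-1,n,memo))
--         return memo[m][n]
--
-- def search(searchInput,productList):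
--     searchResults = []
--     maxNameLength = 50 # Replace with max_value of Product name in the future
--     for i in range(len(productList)):
--         product = productList[i].lower()
--         m = len(searchInput)
--         n = len(product)
--         memo = [[-1]*maxNameLength]*maxNameLength
--         similarity = lcs(searchInput,product,m,n,memo)
--         if similarity > m: similarity = m # Weird bug I couldn't figure out, caused values > m which would freak out the sorting
--         if min(3,n) <= similarity:
--             searchResults.append([i,similarity])
--             for j in range(len(searchResults)-1,0,-1):
--                 if searchResults[j-1][1] < searchResults[j][1]: (searchResults[j-1],searchResults[j]) = (searchResults[j],searchResults[j-1])
--     return searchResults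
-- ===== SOURCE B (Python) =====
-- def lcs(s1,s2,m,n,memo):
--     if m == 0 or n == 0:
--         return 0
--     if memo[m][n] != -1:
--         return memo[m][n]
--     if s1[m-1] == s2[n-1]:
--         memo[m][n] = 1 + lcs(s1,s2,m-1,n-1,memo)
--         return memo[m][n]
--     else:
--         memo[m][n] =  max(lcs(s1,s2,m,n-1,memo),lcs(s1,s2,m-1,n,memo))
--         return memo[m][n]
--
-- def search(searchInput, productList):
--     results = []
--     for i, name in enumerate(productList):
--         product = name.lower()
--         memo = [[-1]*50]*50
--         similarity = min(lcs(searchInput, product, len(searchInput), len(product), memo), len(searchInput))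
--         if min(3, len(product)) <= similarity:
--             results.append([i, similarity])
--     results.sort(key=lambda r: -r[1])
--     return results
-- ===== Notes on version B (the rewrite author's own statement) =====
-- stated objective: simpler
-- what changed: B keeps the (buggy shared-row memo) LCS helper verbatim but replaces A's per-append bubble-up insertion pass inside the product loop by a single build-then-stable-sort step (sort once on key -similarity) after the loop.
import Mathlib
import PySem

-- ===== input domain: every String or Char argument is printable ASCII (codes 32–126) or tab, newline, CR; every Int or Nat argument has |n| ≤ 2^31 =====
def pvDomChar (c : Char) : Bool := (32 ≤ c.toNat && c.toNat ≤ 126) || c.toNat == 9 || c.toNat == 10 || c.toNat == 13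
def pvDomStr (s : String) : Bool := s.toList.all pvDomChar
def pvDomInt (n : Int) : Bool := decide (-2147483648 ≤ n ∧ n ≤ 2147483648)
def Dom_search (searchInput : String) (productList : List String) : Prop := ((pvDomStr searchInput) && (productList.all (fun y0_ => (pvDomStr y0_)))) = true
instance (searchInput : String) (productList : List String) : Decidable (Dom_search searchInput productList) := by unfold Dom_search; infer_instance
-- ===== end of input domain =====

-- B replaces A's per-append bubble-up insertion pass by one build-then-stable-sort pass (sort key -similarity); objective: simpler.
-- The buggy LCS memo ([[-1]*50]*50 = 50 aliases of ONE row) is kept verbatim in both.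

-- ===== PORT A =====
-- Python's memo `[[-1]*50]*50` is 50 references to the SAME inner list, so every read/write
-- `memo[m][n]` touches column n of that single shared row; the port models the memo as that
-- one row (exact within Pre_search, where every index n stays below 50 and m below 50).
def lcsA (s1 s2 : List Char) : Nat → Nat → Nat → List Int → Int × List Int
  | 0, _, _, memo => (0, memo)   -- fuel guard only (callers pass fuel = m+n, which always suffices); Python has no such case
  | fuel+1, m, n, memo =>
    if m = 0 ∨ n = 0 then (0, memo)
    else
      let v := memo.getD n (-1)
      if v ≠ -1 then (v, memo)
      else if s1.getD (m-1) ' ' = s2.getD (n-1) ' ' then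
        let r := lcsA s1 s2 fuel (m-1) (n-1) memo
        (1 + r.1, r.2.set n (1 + r.1))
      else
        let r1 := lcsA s1 s2 fuel m (n-1) memo
        let r2 := lcsA s1 s2 fuel (m-1) n r1.2
        (max r1.1 r2.1, r2.2.set n (max r1.1 r2.1))

-- one iteration of A's inner `for j in range(len(searchResults)-1,0,-1)` swap loop
def bstep (st : List (List Int)) (j : Int) : List (List Int) :=
  let a := PySem.List.pyGetD st (j-1) []
  let b := PySem.List.pyGetD st j []
  if PySem.List.pyGetD a 1 0 < PySem.List.pyGetD b 1 0 then
    PySem.List.pySetD (PySem.List.pySetD st (j-1) b) j a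
  else st

def bubbleUp (sr : List (List Int)) : List (List Int) :=
  (PySem.List.pyRange ((sr.length : Int) - 1) 0 (-1)).foldl bstep sr

def search (searchInput : String) (productList : List String) : List (List Int) :=
  (PySem.List.pyRange 0 (PySem.List.len productList) 1).foldl (fun searchResults i =>
    let product := PySem.Chars.lower (PySem.List.pyGetD productList i "").toList
    let m := searchInput.toList.length
    let n := product.length
    let memo := List.replicate 50 (-1 : Int)
    let similarity := (lcsA searchInput.toList product (m+n) m n memo).1
    let similarity := if similarity > (m : Int) then (m : Int) else similarity
    if min 3 (n : Int) ≤ similarity then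
      bubbleUp (searchResults ++ [[i, similarity]])
    else searchResults) []

-- ===== PORT B =====
def search_alt (searchInput : String) (productList : List String) : List (List Int) :=
  let results := (PySem.List.enumerate productList).foldl (fun results p =>
    let product := PySem.Chars.lower p.2.toList
    let memo := List.replicate 50 (-1 : Int)
    let similarity := min (lcsA searchInput.toList product
        (searchInput.toList.length + product.length)
        searchInput.toList.length product.length memo).1 (searchInput.toList.length : Int)
    if min 3 (product.length : Int) ≤ similarity then results ++ [[p.1, similarity]]
    else results) []
  PySem.List.sorted results (fun r => -(PySem.List.pyGetD r 1 0)) false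

-- ===== PRECONDITION & SPEC =====
-- Pre_ excludes exactly the inputs where Python A raises IndexError: the 50×50 memo is indexed
-- at [len(searchInput)][len(product)], so any product pairing a nonempty string of length ≥ 50
-- on either side crashes A.
def Pre_search (searchInput : String) (productList : List String) : Prop :=
  ∀ p ∈ productList, searchInput.toList.length = 0 ∨ p.toList.length = 0 ∨
    (searchInput.toList.length ≤ 49 ∧ p.toList.length ≤ 49)
instance (searchInput : String) (productList : List String) : Decidable (Pre_search searchInput productList) := by unfold Pre_search; infer_instance
def pvWitness_search : String × List String := ("laptop", ["Laptop Pro", "desk", "lamp"])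

def Spec_search (searchInput : String) (productList : List String) (out : List (List Int)) : Prop := out = search_alt searchInput productList
instance (searchInput : String) (productList : List String) (out : List (List Int)) : Decidable (Spec_search searchInput productList out) := by unfold Spec_search; infer_instance

-- ===== CLAIM (what is proved, stated in full; the proofs are below) =====
def Claim_equal_search : Prop := ∀ (searchInput : String) (productList : List String), Dom_search searchInput productList → Pre_search searchInput productList → Spec_search searchInput productList (search searchInput productList)

-- ===== LEMMAS AND PROOFS =====

-- similarity key of a result entry [i, sim]
def keyI (r : List Int) : Int := PySem.List.pyGetD r 1 0

-- A's inner loop, truncated to start at index k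
def loopF (st : List (List Int)) (k : Nat) : List (List Int) :=
  (PySem.List.pyRange (k : Int) 0 (-1)).foldl bstep st

theorem pyRange_neg_one_cons (k : Nat) :
    PySem.List.pyRange ((k+1 : Nat) : Int) 0 (-1) = ((k+1 : Nat) : Int) :: PySem.List.pyRange (k : Int) 0 (-1) := by
  have hk : (if 0 < k then k else 0) = k := by split_ifs <;> omega
  simp [PySem.List.pyRange, List.range_succ_eq_map, List.map_map, hk]


theorem loopF_zero (st : List (List Int)) : loopF st 0 = st := by
  simp [loopF, PySem.List.pyRange]

theorem loopF_succ (st : List (List Int)) (k : Nat) :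
    loopF st (k+1) = loopF (bstep st ((k+1 : Nat) : Int)) k := by
  unfold loopF
  rw [pyRange_neg_one_cons, List.foldl_cons]

theorem bubbleUp_eq_loopF (sr : List (List Int)) : bubbleUp sr = loopF sr (sr.length - 1) := by
  cases sr with
  | nil => simp [bubbleUp, loopF]
  | cons a t =>
      unfold bubbleUp loopF
      congr 2
      push_cast [List.length_cons]
      omega

theorem bstep_length (st : List (List Int)) (j : Int) : (bstep st j).length = st.length := by
  unfold bstep
  dsimp only
  split <;> simp [PySem.List.length_pySetD]

theorem bstep_append (ys zs : List (List Int)) (j : Nat) (h1 : 1 ≤ j) (h2 : j < ys.length) :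
    bstep (ys ++ zs) (j : Int) = bstep ys (j : Int) ++ zs := by
  have hj : ((j : Int) - 1) = ((j-1 : Nat) : Int) := by omega
  have hj1 : j - 1 < ys.length := by omega
  unfold bstep
  dsimp only
  rw [hj, PySem.List.pyGetD_natCast, PySem.List.pyGetD_natCast,
      PySem.List.pyGetD_natCast, PySem.List.pyGetD_natCast,
      List.getD_append _ _ _ _ hj1, List.getD_append _ _ _ _ h2]
  split
  · rw [PySem.List.pySetD_natCast, PySem.List.pySetD_natCast,
        PySem.List.pySetD_natCast, PySem.List.pySetD_natCast,
        List.set_append, if_pos hj1, List.set_append]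
    rw [if_pos (by simpa using h2)]
  · rfl

theorem loopF_append (k : Nat) (ys zs : List (List Int)) (h : k < ys.length) :
    loopF (ys ++ zs) k = loopF ys k ++ zs := by
  induction k generalizing ys with
  | zero => rw [loopF_zero, loopF_zero]
  | succ k ih =>
      rw [loopF_succ, loopF_succ, bstep_append ys zs (k+1) (by omega) h]
      exact ih _ (by rw [bstep_length]; omega)

theorem loopF_sorted (k : Nat) (st : List (List Int))
    (h : st.Pairwise (fun a b => keyI b ≤ keyI a)) (hk : k < st.length) : loopF st k = st := by
  induction k with
  | zero => exact loopF_zero st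
  | succ k ih =>
      rw [loopF_succ]
      have hb : bstep st ((k+1 : Nat) : Int) = st := by
        have hle : keyI (st[k+1]'hk) ≤ keyI (st[k]'(by omega)) :=
          (List.pairwise_iff_getElem.mp h) k (k+1) (by omega) hk (by omega)
        have hj : (((k+1 : Nat) : Int) - 1) = ((k : Nat) : Int) := by omega
        unfold bstep
        dsimp only
        rw [hj, PySem.List.pyGetD_natCast, PySem.List.pyGetD_natCast,
            List.getD_eq_getElem _ _ (by omega : k < st.length),
            List.getD_eq_getElem _ _ hk]
        rw [if_neg (by simpa [keyI] using not_lt.mpr hle)]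
      rw [hb]
      exact ih (by omega)

theorem bubble_insert (u v : List (List Int)) (x : List Int)
    (hu : ∀ a ∈ u, keyI x ≤ keyI a)
    (hup : u.Pairwise (fun a b => keyI b ≤ keyI a))
    (hv : ∀ a ∈ v, keyI a < keyI x) :
    bubbleUp (u ++ v ++ [x]) = u ++ x :: v := by
  induction v using List.reverseRecOn with
  | nil =>
      simp only [List.append_nil]
      rcases eq_or_ne u [] with rfl | hne
      · rw [bubbleUp_eq_loopF]; simp [loopF_zero]
      · obtain ⟨l, hl⟩ : ∃ l, u.length = l + 1 := by
          cases u with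
          | nil => exact absurd rfl hne
          | cons a t => exact ⟨t.length, rfl⟩
        have hlen : (u ++ [x]).length - 1 = l + 1 := by simp [hl]
        rw [bubbleUp_eq_loopF, hlen, loopF_succ]
        have hb : bstep (u ++ [x]) ((l+1 : Nat) : Int) = u ++ [x] := by
          have hj : (((l+1 : Nat) : Int) - 1) = ((l : Nat) : Int) := by omega
          unfold bstep; dsimp only
          rw [hj, PySem.List.pyGetD_natCast, PySem.List.pyGetD_natCast,
              List.getD_append _ _ _ _ (by omega : l < u.length),
              List.getD_eq_getElem _ _ (by simp; omega : l + 1 < (u ++ [x]).length)]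
          have hx : (u ++ [x])[l+1]'(by simp; omega) = x := by
            rw [List.getElem_append_right (by omega)]
            simp [hl]
          rw [hx, if_neg]
          have := hu (u.getD l []) (by rw [List.getD_eq_getElem _ _ (by omega)]; exact List.getElem_mem _)
          simpa [keyI] using not_lt.mpr this
        rw [hb, loopF_append l u [x] (by omega), loopF_sorted l u hup (by omega)]
  | append_singleton v' w ih =>
      have hw : keyI w < keyI x := hv w (by simp)
      set A := u ++ v' with hA
      have hst : u ++ (v' ++ [w]) ++ [x] = A ++ [w, x] := by simp [hA]
      have hlen : (A ++ [w, x]).length - 1 = A.length + 1 := by simp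
      rw [hst, bubbleUp_eq_loopF, hlen, loopF_succ]
      have hb : bstep (A ++ [w, x]) ((A.length + 1 : Nat) : Int) = (A ++ [x]) ++ [w] := by
        have hj : (((A.length + 1 : Nat) : Int) - 1) = ((A.length : Nat) : Int) := by omega
        unfold bstep; dsimp only
        rw [hj, PySem.List.pyGetD_natCast, PySem.List.pyGetD_natCast,
            List.getD_eq_getElem _ _ (by simp : A.length < (A ++ [w, x]).length),
            List.getD_eq_getElem _ _ (by simp : A.length + 1 < (A ++ [w, x]).length)]
        have h1 : (A ++ [w, x])[A.length]'(by simp) = w := by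
          rw [List.getElem_append_right (by omega)]; simp
        have h2 : (A ++ [w, x])[A.length + 1]'(by simp) = x := by
          rw [List.getElem_append_right (by omega)]; simp
        rw [h1, h2, if_pos (by simpa [keyI] using hw)]
        rw [PySem.List.pySetD_natCast, PySem.List.pySetD_natCast,
            List.set_append, if_neg (by omega)]
        simp
      rw [hb, loopF_append A.length (A ++ [x]) [w] (by simp)]
      have : loopF (A ++ [x]) A.length = bubbleUp (A ++ [x]) := by
        rw [bubbleUp_eq_loopF]; simp
      rw [this, hA, ih (fun a ha => hv a (by simp [ha]))]
      simp

theorem insert_split (u v : List (List Int)) (x : List Int)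
    (hu : ∀ a ∈ u, keyI x ≤ keyI a)
    (hv : ∀ h t, v = h :: t → keyI h < keyI x) :
    PySem.List.insertBy (fun a b => decide (keyI b < keyI a)) x (u ++ v) = u ++ x :: v := by
  induction u with
  | nil =>
      cases v with
      | nil => simp [PySem.List.insertBy]
      | cons h t =>
          simp only [List.nil_append]
          rw [PySem.List.insertBy]
          simp [hv h t rfl]
  | cons a u' ih =>
      simp only [List.cons_append]
      rw [PySem.List.insertBy]
      rw [if_neg (by simpa using not_lt.mpr (hu a (by simp)))]
      rw [ih (fun b hb => hu b (by simp [hb]))]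

theorem drop_lt (p : List Int → Bool) (x : List Int)
    (hp : ∀ a, p a = false → keyI a < keyI x) :
    ∀ acc : List (List Int), acc.Pairwise (fun a b => keyI b ≤ keyI a) →
      ∀ a ∈ acc.dropWhile p, keyI a < keyI x := by
  intro acc
  induction acc with
  | nil => intro _ a ha; simp at ha
  | cons b rest ih =>
      intro hpair a ha
      by_cases hb : p b
      · exact ih (List.Pairwise.of_cons hpair) a (by simpa [List.dropWhile, hb] using ha)
      · rw [List.dropWhile_cons_of_neg (by simp [hb])] at ha
        rcases List.mem_cons.mp ha with rfl | hmem
        · exact hp a (by simpa using hb)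
        · calc keyI a ≤ keyI b := (List.pairwise_cons.mp hpair).1 a hmem
               _ < keyI x := hp b (by simpa using hb)

theorem bubble_eq_insertBy (acc : List (List Int)) (x : List Int)
    (h : acc.Pairwise (fun a b => keyI b ≤ keyI a)) :
    bubbleUp (acc ++ [x]) = PySem.List.insertBy (fun a b => decide (keyI b < keyI a)) x acc := by
  set p : List Int → Bool := fun y => decide (keyI x ≤ keyI y) with hp
  have hsplit : acc.takeWhile p ++ acc.dropWhile p = acc := List.takeWhile_append_dropWhile
  have hu : ∀ a ∈ acc.takeWhile p, keyI x ≤ keyI a := by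
    intro a ha; have := List.mem_takeWhile_imp ha; simpa [hp] using this
  have hup : (acc.takeWhile p).Pairwise (fun a b => keyI b ≤ keyI a) :=
    h.sublist (List.takeWhile_sublist p)
  have hv : ∀ a ∈ acc.dropWhile p, keyI a < keyI x :=
    drop_lt p x (fun a hfa => by simpa [hp, not_le] using hfa) acc h
  calc bubbleUp (acc ++ [x])
      = bubbleUp (acc.takeWhile p ++ acc.dropWhile p ++ [x]) := by rw [hsplit]
    _ = acc.takeWhile p ++ x :: acc.dropWhile p := bubble_insert _ _ _ hu hup hv
    _ = PySem.List.insertBy (fun a b => decide (keyI b < keyI a)) x (acc.takeWhile p ++ acc.dropWhile p) := by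
        rw [insert_split _ _ _ hu (fun h t hht => hv h (by simp [hht]))]
    _ = _ := by rw [hsplit]

theorem sorted_append_insert (ps : List (List Int)) (x : List Int) :
    PySem.List.sorted (ps ++ [x]) keyI true =
    PySem.List.insertBy (fun a b => decide (keyI b < keyI a)) x (PySem.List.sorted ps keyI true) := by
  rw [PySem.List.sorted_rev_eq_foldl_insertBy, PySem.List.sorted_rev_eq_foldl_insertBy,
      List.foldl_append]
  simp

theorem fold_main {α : Type} (f : α → List Int) (c : α → Prop) [DecidablePred c] (l : List α) :
    l.foldl (fun acc p => if c p then bubbleUp (acc ++ [f p]) else acc) [] =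
    PySem.List.sorted (l.foldl (fun acc p => if c p then acc ++ [f p] else acc) []) keyI true := by
  induction l using List.reverseRecOn with
  | nil => simp [PySem.List.sorted]
  | append_singleton l' p ih =>
      rw [List.foldl_append, List.foldl_append]
      simp only [List.foldl_cons, List.foldl_nil]
      by_cases hc : c p
      · simp only [hc, if_pos]
        rw [ih, sorted_append_insert]
        exact bubble_eq_insertBy _ _ (PySem.List.sorted_pairwise_rev _ _)
      · simp only [hc, ih]
        simp

theorem sorted_negkey (xs : List (List Int)) :
    PySem.List.sorted xs (fun r => -(PySem.List.pyGetD r 1 0)) false = PySem.List.sorted xs keyI true := by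
  unfold PySem.List.sorted
  simp only []
  congr 1
  funext acc r
  congr 1
  funext a b
  simp [keyI, neg_lt_neg_iff]

-- ===== VERDICT (by name: the statement is the Claim_ definition above) =====
theorem search_spec : Claim_equal_search := by
  unfold Claim_equal_search
  intro s l _hD _hP
  unfold Spec_search search search_alt
  rw [PySem.List.enumerate_eq_map_pyRange l "", List.foldl_map, sorted_negkey]
  have hmin : ∀ a b : Int, (if a > b then b else a) = min a b := by
    intro a b; rw [min_def]; split_ifs <;> omega
  dsimp only
  simp only [hmin]
  exact fold_main
    (fun j => [j, min ((lcsA s.toList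
        (PySem.Chars.lower (PySem.List.pyGetD l j "").toList)
        (s.toList.length + (PySem.Chars.lower (PySem.List.pyGetD l j "").toList).length)
        s.toList.length
        (PySem.Chars.lower (PySem.List.pyGetD l j "").toList).length
        (List.replicate 50 (-1 : Int))).1) (s.toList.length : Int)])
    (fun j => min 3 (((PySem.Chars.lower (PySem.List.pyGetD l j "").toList).length : Nat) : Int) ≤
        min ((lcsA s.toList
        (PySem.Chars.lower (PySem.List.pyGetD l j "").toList)
        (s.toList.length + (PySem.Chars.lower (PySem.List.pyGetD l j "").toList).length)
        s.toList.length
        (PySem.Chars.lower (PySem.List.pyGetD l j "").toList).length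
        (List.replicate 50 (-1 : Int))).1) (s.toList.length : Int))
    (PySem.List.pyRange 0 (PySem.List.len l) 1)
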